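-- pv_equiv track=rewrite | github.com/rjames187/Leetcode-solutions | basicRecursionProblems.py | countHi2
-- ===== SOURCE A (Python) =====
-- def countHi2(str):
--     if len(str) < 2:
--         return 0
--     elif str == 'xhi':
--         return 0
--     elif str == 'hi':
--         return 1
--     elif len(str) < 3:
--         return 0
--     else:
--         if str[0:3] == 'xhi':
--             return countHi2(str[3:])
--         elif str[:2] == 'hi':
--             return 1 + countHi2(str[2:])
--         else:
--             return countHi2(str[1:])
-- ===== SOURCE B (Python) =====
-- def countHi2(str):
--     count = 0
--     prev = None
--     for a, b in zip(str, str[1:]):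
--         if a == 'h' and b == 'i' and prev != 'x':
--             count += 1
--         prev = a
--     return count
-- ===== Notes on version B (the rewrite author's own statement) =====
-- stated objective: simpler
-- what changed: Replaces A's recursion with string-equality special cases and variable-length skips ('xhi' jumps 3, 'hi' jumps 2, else 1) by one flat pass over adjacent character pairs with a look-back on the previous character.
import Mathlib
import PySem

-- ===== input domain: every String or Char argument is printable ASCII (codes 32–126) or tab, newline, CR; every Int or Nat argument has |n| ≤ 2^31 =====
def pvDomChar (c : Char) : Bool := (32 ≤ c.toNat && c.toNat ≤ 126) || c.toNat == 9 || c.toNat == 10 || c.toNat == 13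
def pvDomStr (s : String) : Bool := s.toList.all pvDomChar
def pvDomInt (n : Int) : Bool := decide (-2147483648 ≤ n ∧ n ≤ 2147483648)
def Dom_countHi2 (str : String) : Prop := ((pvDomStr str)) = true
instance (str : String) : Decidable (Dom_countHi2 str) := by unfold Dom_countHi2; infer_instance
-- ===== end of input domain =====

-- B replaces A's recursive skip logic ('xhi' jumps 3, 'hi' jumps 2) by a single flat
-- pass over adjacent character pairs with a look-back on the previous character (simpler).

-- ===== PORT A =====
-- A's recursion, step for step, over the character list of the string
def countHi2Go (l : List Char) : Int :=
  if l.length < 2 then 0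
  else if l = ['x', 'h', 'i'] then 0
  else if l = ['h', 'i'] then 1
  else if l.length < 3 then 0
  else
    if l.take 3 = ['x', 'h', 'i'] then countHi2Go (l.drop 3)
    else if l.take 2 = ['h', 'i'] then 1 + countHi2Go (l.drop 2)
    else countHi2Go (l.drop 1)
termination_by l.length
decreasing_by
  all_goals simp [List.length_drop]; omega

def countHi2 (str : String) : Int := countHi2Go str.toList

-- ===== PORT B =====
-- Source B: count=0, prev=None; for (a,b) in zip(s, s[1:]): if a='h' and b='i' and prev≠'x': count+=1; prev=a
def countHi2_alt (str : String) : Int :=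
  let l := str.toList
  (List.foldl
    (fun (st : Int × Option Char) (p : Char × Char) =>
      ((if p.1 = 'h' ∧ p.2 = 'i' ∧ st.2 ≠ some 'x' then st.1 + 1 else st.1), some p.1))
    (0, none) (l.zip l.tail)).1

-- ===== PRECONDITION & SPEC =====
def Spec_countHi2 (str : String) (out : Int) : Prop := out = countHi2_alt str
instance (str : String) (out : Int) : Decidable (Spec_countHi2 str out) := by unfold Spec_countHi2; infer_instance

-- ===== CLAIM (what is proved, stated in full; the proofs are below) =====
def Claim_equal_countHi2 : Prop := ∀ (str : String), Dom_countHi2 str → Spec_countHi2 str (countHi2 str)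

-- ===== LEMMAS AND PROOFS =====

-- mathematical reading of B's loop: count of 'hi' pairs, first position guarded by prev
def gHi : Option Char → List Char → Int
  | prev, a :: b :: rest =>
      (if a = 'h' ∧ b = 'i' ∧ prev ≠ some 'x' then 1 else 0) + gHi (some a) (b :: rest)
  | _, _ => 0

theorem foldl_gHi (l : List Char) : ∀ (c : Int) (prev : Option Char),
    (List.foldl
      (fun (st : Int × Option Char) (p : Char × Char) =>
        ((if p.1 = 'h' ∧ p.2 = 'i' ∧ st.2 ≠ some 'x' then st.1 + 1 else st.1), some p.1))
      (c, prev) (l.zip l.tail)).1 = c + gHi prev l := by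
  induction l with
  | nil => simp [gHi]
  | cons a t ih =>
    cases t with
    | nil => simp [gHi]
    | cons b rest =>
      intro c prev
      simp only [List.tail_cons, List.zip_cons_cons, List.foldl_cons]
      have := ih (if a = 'h' ∧ b = 'i' ∧ prev ≠ some 'x' then c + 1 else c) (some a)
      simp only [List.tail_cons] at this
      rw [this, gHi]
      split <;> ring

theorem gHi_prev (p q : Option Char) (l : List Char)
    (hp : p ≠ some 'x') (hq : q ≠ some 'x') : gHi p l = gHi q l := by
  cases l with
  | nil => rfl
  | cons a t =>
    cases t with
    | nil => rfl
    | cons b rest => simp [gHi, hp, hq]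

theorem countHi2Go_eq_gHi (l : List Char) : countHi2Go l = gHi none l := by
  match l with
  | [] => rw [countHi2Go]; simp [gHi]
  | [a] => rw [countHi2Go]; simp [gHi]
  | [a, b] =>
    rw [countHi2Go]
    by_cases hab : a = 'h' ∧ b = 'i'
    · obtain ⟨ha, hb⟩ := hab; subst ha; subst hb; decide
    · obtain ha | hb := not_and_or.mp hab
      · simp [gHi, ha]
      · simp [gHi, hb]
  | a :: b :: c :: t =>
    rw [countHi2Go]
    by_cases hxhi : a = 'x' ∧ b = 'h' ∧ c = 'i'
    · obtain ⟨ha, hb, hc⟩ := hxhi; subst ha; subst hb; subst hc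
      rcases t with _ | ⟨d, t'⟩
      · simp [gHi]
      · have ih := countHi2Go_eq_gHi (d :: t')
        have hp := gHi_prev (some 'i') none (d :: t') (by simp) (by simp)
        simp [gHi, ih, hp]
    · by_cases hhi : a = 'h' ∧ b = 'i'
      · obtain ⟨ha, hb⟩ := hhi; subst ha; subst hb
        have ih := countHi2Go_eq_gHi (c :: t)
        have hp := gHi_prev (some 'i') none (c :: t) (by simp) (by simp)
        simp [gHi, ih, hp]
      · have ih := countHi2Go_eq_gHi (b :: c :: t)
        by_cases hax : a = 'x'
        · subst hax
          have hbc : ¬ (b = 'h' ∧ c = 'i') := fun h => hxhi ⟨rfl, h.1, h.2⟩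
          obtain hb | hc := not_and_or.mp hbc
          · simp [gHi, ih, hb]
          · simp [gHi, ih, hc]
        · obtain ha | hb := not_and_or.mp hhi
          · simp [gHi, ih, ha, hax]
          · simp [gHi, ih, hb, hax]
termination_by l.length
decreasing_by all_goals simp

-- ===== VERDICT (by name: the statement is the Claim_ definition above) =====
theorem countHi2_spec : Claim_equal_countHi2 := by
  intro s _
  unfold Spec_countHi2 countHi2
  simp only [countHi2_alt]
  rw [countHi2Go_eq_gHi, foldl_gHi]
  ring
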